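-- pv_equiv track=rewrite | github.com/hunter3789/VLM-Skew-T | source/tool_call.py | determine_size
-- ===== SOURCE A (Python) =====
-- def determine_size(delta1, delta2):
--     table = [
--         (50, [(10,99), (9,85), (8,75), (7,60), (6,50), (5,45), (4,35), (3,25), (2,20), (1,10), (0,5)]),
--         (45, [(11,99), (10,90), (9,80), (8,65), (7,60), (6,50), (5,45), (4,35), (3,25), (2,20), (1,5)]),
--         (40, [(12,99), (11,85), (10,80), (9,70), (8,60), (7,55), (6,45), (5,40), (4,30), (3,20), (2,15), (1,5)]),
--         (35, [(12,80), (11,75), (10,70), (9,60), (8,55), (7,50), (6,45), (5,40), (4,30), (3,20), (2,15), (1,5)]),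
--         (30, [(12,65), (10,60), (9,55), (8,50), (7,45), (6,40), (5,35), (4,25), (3,20), (2,10)]),
--         (25, [(13,55), (10,50), (9,45), (7,40), (6,35), (5,30), (4,20), (3,15), (2,5)]),
--         (20, [(13,50), (11,45), (9,40), (8,35), (7,30), (6,25), (5,20), (4,15), (3,5)]),
--         (15, [(11,35), (10,30), (8,25), (6,20), (5,15), (4,10)]),
--         (10, [(12,25), (10,20), (7,15), (6,10), (5,5)]),
--         (0, [(12,15), (8,10), (6,5)]),
--     ]
--
--     for delta2_thresh, pairs in table:
--         if delta2 >= delta2_thresh: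
--             for d1_thresh, s in pairs:
--                 if delta1 >= d1_thresh:
--                     return s
--             break
--     return 0
-- ===== SOURCE B (Python) =====
-- # Size lookup rewritten around binary search: the original descending threshold
-- # table, pre-extracted once into ascending form (delta2 band thresholds, and per
-- # band the ascending delta1 thresholds with their sizes, bands in the same order).
-- _D2_ASC = [0, 10, 15, 20, 25, 30, 35, 40, 45, 50]
--
-- _BANDS = [
--     ([6, 8, 12], [5, 10, 15]),
--     ([5, 6, 7, 10, 12], [5, 10, 15, 20, 25]),
--     ([4, 5, 6, 8, 10, 11], [10, 15, 20, 25, 30, 35]),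
--     ([3, 4, 5, 6, 7, 8, 9, 11, 13], [5, 15, 20, 25, 30, 35, 40, 45, 50]),
--     ([2, 3, 4, 5, 6, 7, 9, 10, 13], [5, 15, 20, 30, 35, 40, 45, 50, 55]),
--     ([2, 3, 4, 5, 6, 7, 8, 9, 10, 12], [10, 20, 25, 35, 40, 45, 50, 55, 60, 65]),
--     ([1, 2, 3, 4, 5, 6, 7, 8, 9, 10, 11, 12], [5, 15, 20, 30, 40, 45, 50, 55, 60, 70, 75, 80]),
--     ([1, 2, 3, 4, 5, 6, 7, 8, 9, 10, 11, 12], [5, 15, 20, 30, 40, 45, 55, 60, 70, 80, 85, 99]),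
--     ([1, 2, 3, 4, 5, 6, 7, 8, 9, 10, 11], [5, 20, 25, 35, 45, 50, 60, 65, 80, 90, 99]),
--     ([0, 1, 2, 3, 4, 5, 6, 7, 8, 9, 10], [5, 10, 20, 25, 35, 45, 50, 60, 75, 85, 99]),
-- ]
--
--
-- def _bisect_right(a, x):
--     """Index after the last element <= x in ascending list a (hand-rolled bisect)."""
--     lo, hi = 0, len(a)
--     while lo < hi:
--         mid = (lo + hi) // 2
--         if x < a[mid]:
--             hi = mid
--         else:
--             lo = mid + 1
--     return lo
--
--
-- def determine_size(delta1, delta2):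
--     i = _bisect_right(_D2_ASC, delta2)
--     if i == 0:
--         return 0
--     thresh_asc, size_asc = _BANDS[i - 1]
--     j = _bisect_right(thresh_asc, delta1)
--     if j == 0:
--         return 0
--     return size_asc[j - 1]
-- ===== Notes on version B (the rewrite author's own statement) =====
-- stated objective: idiomatic
-- what changed: Replaces A's two nested linear first-match scans over the descending table with a one-time preprocessing into ascending threshold lists plus two bisect_right binary searches (band then size).
import Mathlib
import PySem

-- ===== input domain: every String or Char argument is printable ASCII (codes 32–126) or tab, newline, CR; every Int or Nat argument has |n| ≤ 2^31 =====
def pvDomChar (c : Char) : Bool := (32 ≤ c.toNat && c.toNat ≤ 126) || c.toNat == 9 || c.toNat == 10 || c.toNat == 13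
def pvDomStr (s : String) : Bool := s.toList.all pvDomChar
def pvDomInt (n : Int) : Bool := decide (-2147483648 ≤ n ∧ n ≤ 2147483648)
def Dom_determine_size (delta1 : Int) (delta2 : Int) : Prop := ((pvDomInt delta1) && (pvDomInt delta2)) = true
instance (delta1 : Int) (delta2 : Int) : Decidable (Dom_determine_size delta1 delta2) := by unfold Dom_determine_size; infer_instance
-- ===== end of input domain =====

-- B replaces A's two nested linear first-match scans over the descending table by
-- pre-extracted ascending tables queried with two hand-rolled bisect_right binary
-- searches; same return value everywhere.

-- ===== PORT A =====
def pvTable : List (Int × List (Int × Int)) := [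
    (50, [(10,99), (9,85), (8,75), (7,60), (6,50), (5,45), (4,35), (3,25), (2,20), (1,10), (0,5)]),
    (45, [(11,99), (10,90), (9,80), (8,65), (7,60), (6,50), (5,45), (4,35), (3,25), (2,20), (1,5)]),
    (40, [(12,99), (11,85), (10,80), (9,70), (8,60), (7,55), (6,45), (5,40), (4,30), (3,20), (2,15), (1,5)]),
    (35, [(12,80), (11,75), (10,70), (9,60), (8,55), (7,50), (6,45), (5,40), (4,30), (3,20), (2,15), (1,5)]),
    (30, [(12,65), (10,60), (9,55), (8,50), (7,45), (6,40), (5,35), (4,25), (3,20), (2,10)]),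
    (25, [(13,55), (10,50), (9,45), (7,40), (6,35), (5,30), (4,20), (3,15), (2,5)]),
    (20, [(13,50), (11,45), (9,40), (8,35), (7,30), (6,25), (5,20), (4,15), (3,5)]),
    (15, [(11,35), (10,30), (8,25), (6,20), (5,15), (4,10)]),
    (10, [(12,25), (10,20), (7,15), (6,10), (5,5)]),
    (0, [(12,15), (8,10), (6,5)])]

-- inner 'for d1_thresh, s in pairs' with early return; none = fell through (break)
def pvInnerScan (delta1 : Int) : List (Int × Int) → Option Int
  | [] => none
  | (t, s) :: rest => if delta1 ≥ t then some s else pvInnerScan delta1 rest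

-- outer 'for delta2_thresh, pairs in table' with early return / break / final return 0
def pvOuterScan (delta1 : Int) (delta2 : Int) : List (Int × List (Int × Int)) → Int
  | [] => 0
  | (t, pairs) :: rest =>
      if delta2 ≥ t then
        match pvInnerScan delta1 pairs with
        | some s => s
        | none => 0
      else pvOuterScan delta1 delta2 rest

def determine_size (delta1 : Int) (delta2 : Int) : Int :=
  pvOuterScan delta1 delta2 pvTable

-- ===== PORT B =====
-- B's own pre-extracted ascending tables (literals in Source B, same order as there)
def pvD2Asc : List Int := [0, 10, 15, 20, 25, 30, 35, 40, 45, 50]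

def pvBands : List (List Int × List Int) := [
    ([6, 8, 12], [5, 10, 15]),
    ([5, 6, 7, 10, 12], [5, 10, 15, 20, 25]),
    ([4, 5, 6, 8, 10, 11], [10, 15, 20, 25, 30, 35]),
    ([3, 4, 5, 6, 7, 8, 9, 11, 13], [5, 15, 20, 25, 30, 35, 40, 45, 50]),
    ([2, 3, 4, 5, 6, 7, 9, 10, 13], [5, 15, 20, 30, 35, 40, 45, 50, 55]),
    ([2, 3, 4, 5, 6, 7, 8, 9, 10, 12], [10, 20, 25, 35, 40, 45, 50, 55, 60, 65]),
    ([1, 2, 3, 4, 5, 6, 7, 8, 9, 10, 11, 12], [5, 15, 20, 30, 40, 45, 50, 55, 60, 70, 75, 80]),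
    ([1, 2, 3, 4, 5, 6, 7, 8, 9, 10, 11, 12], [5, 15, 20, 30, 40, 45, 55, 60, 70, 80, 85, 99]),
    ([1, 2, 3, 4, 5, 6, 7, 8, 9, 10, 11], [5, 20, 25, 35, 45, 50, 60, 65, 80, 90, 99]),
    ([0, 1, 2, 3, 4, 5, 6, 7, 8, 9, 10], [5, 10, 20, 25, 35, 45, 50, 60, 75, 85, 99])]

-- _bisect_right's while loop; 'fuel' only makes the recursion structural (hi - lo
-- strictly decreases each iteration, so fuel = a.length never runs out);
-- a[mid] is in range whenever lo < hi ≤ len a, so getD's 0 default is exact there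
def pvBisectLoop (a : List Int) (x : Int) (lo hi : Nat) : Nat → Nat
  | 0 => lo
  | fuel + 1 =>
    if lo < hi then
      let mid := (lo + hi) / 2
      if x < a.getD mid 0 then pvBisectLoop a x lo mid fuel
      else pvBisectLoop a x (mid + 1) hi fuel
    else lo

def pvBisectRight (a : List Int) (x : Int) : Nat :=
  pvBisectLoop a x 0 a.length a.length

def determine_size_alt (delta1 : Int) (delta2 : Int) : Int :=
  let i := pvBisectRight pvD2Asc delta2
  if i = 0 then 0
  else
    let band := pvBands.getD (i - 1) ([], [])
    let j := pvBisectRight band.1 delta1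
    if j = 0 then 0
    else band.2.getD (j - 1) 0

-- ===== PRECONDITION & SPEC =====
def Spec_determine_size (delta1 : Int) (delta2 : Int) (out : Int) : Prop := out = determine_size_alt delta1 delta2
instance (delta1 : Int) (delta2 : Int) (out : Int) : Decidable (Spec_determine_size delta1 delta2 out) := by unfold Spec_determine_size; infer_instance

-- ===== CLAIM (what is proved, stated in full; the proofs are below) =====
def Claim_equal_determine_size : Prop := ∀ (delta1 : Int) (delta2 : Int), Dom_determine_size delta1 delta2 → Spec_determine_size delta1 delta2 (determine_size delta1 delta2)

-- ===== LEMMAS AND PROOFS =====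

-- Proof plan: both programs see delta1/delta2 only through comparisons against the
-- table's constants (delta2 thresholds in [0,50], delta1 thresholds in [0,13]), so each
-- is invariant under clamping the deltas to [-1,50] resp. [-1,13] (congruence lemmas),
-- and the claim reduces to a finite check discharged by decide.

def pvClamp (d lo hi : Int) : Int := max lo (min hi d)

theorem pvClamp_lt_iff {d lo hi e : Int} (h1 : lo < 0) (h2 : 0 <= e) (h3 : e <= hi) :
    (d < e ↔ pvClamp d lo hi < e) := by
  unfold pvClamp; omega

theorem pvInnerScan_congr (d d' : Int) :
    ∀ (pairs : List (Int × Int)), (∀ p ∈ pairs, (d ≥ p.1 ↔ d' ≥ p.1)) →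
    pvInnerScan d pairs = pvInnerScan d' pairs := by
  intro pairs
  induction pairs with
  | nil => intro _; rfl
  | cons p rest ih =>
    intro h
    have hp := h p (List.mem_cons_self ..)
    simp only [pvInnerScan]
    by_cases hc : d ≥ p.1
    · rw [if_pos hc, if_pos (hp.mp hc)]
    · rw [if_neg hc, if_neg (fun hc' => hc (hp.mpr hc'))]
      exact ih (fun q hq => h q (List.mem_cons_of_mem _ hq))

theorem pvOuterScan_congr (d1 d1' d2 d2' : Int) :
    ∀ (table : List (Int × List (Int × Int))),
    (∀ row ∈ table, (d2 ≥ row.1 ↔ d2' ≥ row.1)) →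
    (∀ row ∈ table, ∀ p ∈ row.2, (d1 ≥ p.1 ↔ d1' ≥ p.1)) →
    pvOuterScan d1 d2 table = pvOuterScan d1' d2' table := by
  intro table
  induction table with
  | nil => intro _ _; rfl
  | cons row rest ih =>
    intro h2 h1
    have hr := h2 row (List.mem_cons_self ..)
    simp only [pvOuterScan]
    by_cases hc : d2 ≥ row.1
    · rw [if_pos hc, if_pos (hr.mp hc),
        pvInnerScan_congr d1 d1' row.2 (h1 row (List.mem_cons_self ..))]
    · rw [if_neg hc, if_neg (fun hc' => hc (hr.mpr hc'))]
      exact ih (fun r hr' => h2 r (List.mem_cons_of_mem _ hr'))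
        (fun r hr' => h1 r (List.mem_cons_of_mem _ hr'))

theorem pvBisectLoop_congr (a : List Int) (x x' : Int)
    (h : ∀ e ∈ (0 : Int) :: a, (x < e ↔ x' < e)) :
    ∀ (fuel lo hi : Nat), pvBisectLoop a x lo hi fuel = pvBisectLoop a x' lo hi fuel := by
  intro fuel
  induction fuel with
  | zero => intro lo hi; rfl
  | succ fuel ih =>
    intro lo hi
    simp only [pvBisectLoop]
    by_cases hlh : lo < hi
    · rw [if_pos hlh, if_pos hlh]
      have hmem : a.getD ((lo + hi) / 2) 0 ∈ (0 : Int) :: a := by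
        by_cases hm : (lo + hi) / 2 < a.length
        · exact List.mem_cons_of_mem _ (by rw [List.getD_eq_getElem _ _ hm]; exact a.getElem_mem hm)
        · rw [List.getD_eq_default _ _ (by omega)]; exact List.mem_cons_self ..
      have he := h _ hmem
      by_cases hc : x < a.getD ((lo + hi) / 2) 0
      · rw [if_pos hc, if_pos (he.mp hc)]; exact ih ..
      · rw [if_neg hc, if_neg (fun hc' => hc (he.mpr hc'))]; exact ih ..
    · rw [if_neg hlh, if_neg hlh]

theorem pvBisectRight_congr (a : List Int) (x x' : Int)
    (h : ∀ e ∈ (0 : Int) :: a, (x < e ↔ x' < e)) :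
    pvBisectRight a x = pvBisectRight a x' :=
  pvBisectLoop_congr a x x' h ..

theorem pvAlt_clamp (d1 d2 : Int) :
    determine_size_alt d1 d2 = determine_size_alt (pvClamp d1 (-1) 13) (pvClamp d2 (-1) 50) := by
  have hd2 : ∀ e ∈ (0 : Int) :: pvD2Asc, (d2 < e ↔ pvClamp d2 (-1) 50 < e) := by
    have hb : ∀ e ∈ (0 : Int) :: pvD2Asc, 0 ≤ e ∧ e ≤ 50 := by decide
    intro e he
    exact pvClamp_lt_iff (by norm_num) (hb e he).1 (hb e he).2
  have hi : pvBisectRight pvD2Asc d2 = pvBisectRight pvD2Asc (pvClamp d2 (-1) 50) :=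
    pvBisectRight_congr pvD2Asc d2 _ hd2
  have hband : ∀ k : Nat, ∀ e ∈ (0 : Int) :: (pvBands.getD k ([], [])).1, 0 ≤ e ∧ e ≤ 13 := by
    have hb : ∀ b ∈ pvBands, ∀ e ∈ (0 : Int) :: b.1, 0 ≤ e ∧ e ≤ 13 := by decide
    intro k
    by_cases hk : k < pvBands.length
    · rw [List.getD_eq_getElem _ _ hk]; exact hb _ (pvBands.getElem_mem hk)
    · rw [List.getD_eq_default _ _ (by omega)]
      intro e he; simp only [List.mem_cons, List.not_mem_nil, or_false] at he
      omega
  simp only [determine_size_alt, ← hi]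
  by_cases h0 : pvBisectRight pvD2Asc d2 = 0
  · rw [if_pos h0, if_pos h0]
  · rw [if_neg h0, if_neg h0]
    have hd1 : ∀ e ∈ (0 : Int) ::
        (pvBands.getD (pvBisectRight pvD2Asc d2 - 1) ([], [])).1,
        (d1 < e ↔ pvClamp d1 (-1) 13 < e) := by
      intro e he
      exact pvClamp_lt_iff (by norm_num) (hband _ e he).1 (hband _ e he).2
    rw [pvBisectRight_congr _ d1 (pvClamp d1 (-1) 13) hd1]

theorem pvA_clamp (d1 d2 : Int) :
    determine_size d1 d2 = determine_size (pvClamp d1 (-1) 13) (pvClamp d2 (-1) 50) := by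
  have hb2 : ∀ row ∈ pvTable, 0 ≤ row.1 ∧ row.1 ≤ 50 := by decide
  have hb1 : ∀ row ∈ pvTable, ∀ p ∈ row.2, 0 ≤ p.1 ∧ p.1 ≤ 13 := by decide
  unfold determine_size
  exact pvOuterScan_congr d1 _ d2 _ pvTable
    (fun row hr => by have := hb2 row hr; unfold pvClamp; omega)
    (fun row hr p hp => by have := hb1 row hr p hp; unfold pvClamp; omega)

theorem pvKey : ∀ c1 ∈ Finset.Icc (-1 : Int) 13, ∀ c2 ∈ Finset.Icc (-1 : Int) 50,
    determine_size c1 c2 = determine_size_alt c1 c2 := by decide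

-- ===== VERDICT (by name: the statement is the Claim_ definition above) =====
theorem determine_size_spec : Claim_equal_determine_size := by
  intro delta1 delta2 _
  unfold Spec_determine_size
  rw [pvA_clamp, pvAlt_clamp]
  exact pvKey _ (by unfold pvClamp; simp only [Finset.mem_Icc]; omega)
    _ (by unfold pvClamp; simp only [Finset.mem_Icc]; omega)
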